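-- pv_equiv track=rewrite | github.com/bluedot20/githubTutorial | grace.py | sandwich
-- ===== SOURCE A (Python) =====
-- def digitChecker(n):
-- 	lDigit = n % 10
-- 	fDigit = n // 10 ** (digitCount(n) - 1)
-- 	if lDigit != fDigit:
-- 		return False
-- 	return True
--
-- def digitCount(n):
-- 	count = 0
-- 	while n > 0:
-- 		n //= 10
-- 		count += 1
-- 	return count
--
-- def sandwich(n):
-- 	if digitChecker(n) == False:
-- 		return False
-- 	digit = n % 10
-- 	n //= 10
-- 	while n > 9:
-- 		if n % 10 == digit:
-- 			return False
-- 		n //= 10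
-- 	return True
-- ===== SOURCE B (Python) =====
-- def sandwich(n):
--     s = str(n)
--     return s[0] == s[-1] and s[-1] not in s[1:-1]
-- ===== Notes on version B (the rewrite author's own statement) =====
-- stated objective: idiomatic
-- what changed: B converts n to its decimal string once and answers with two character comparisons (s[0]==s[-1] and a membership test on s[1:-1]) instead of A's modular-arithmetic digit extraction with digitCount, powers of ten, and an explicit //10 loop.
import Mathlib
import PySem

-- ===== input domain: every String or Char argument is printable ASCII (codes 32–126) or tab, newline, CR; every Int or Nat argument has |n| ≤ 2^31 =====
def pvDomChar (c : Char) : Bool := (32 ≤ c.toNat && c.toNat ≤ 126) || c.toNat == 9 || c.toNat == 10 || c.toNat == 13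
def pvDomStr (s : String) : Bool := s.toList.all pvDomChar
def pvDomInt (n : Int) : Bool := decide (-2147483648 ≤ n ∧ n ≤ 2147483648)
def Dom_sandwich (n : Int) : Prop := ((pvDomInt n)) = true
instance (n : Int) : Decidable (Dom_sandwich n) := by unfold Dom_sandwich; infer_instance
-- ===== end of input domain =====

-- B converts n to its decimal string once and answers by two character comparisons,
-- replacing A's modular-arithmetic digit extraction; objective: idiomatic, not faster.

-- ===== PORT A =====
def digitCount (n : Int) : Int :=
  if n > 0 then digitCount (PySem.Int.floordiv n 10) + 1 else 0
termination_by n.toNat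
decreasing_by
  rw [PySem.Int.floordiv_eq_ediv_of_pos (by omega : (0:Int) < 10)]
  omega

def digitChecker (n : Int) : Bool :=
  let lDigit := PySem.Int.mod n 10
  let dc := digitCount n
  -- fDigit = n // 10 ** (digitCount n - 1).  When dc ≥ 1 this is exact integer floor
  -- division.  When dc = 0 (i.e. n ≤ 0) Python computes the FLOAT n // 0.1, which is
  -- 0.0 for n = 0 and a float ≤ -10 for every n < 0; since fDigit is only compared for
  -- equality with lDigit ∈ [0,9], representing it by 0 resp. -10 is exact.
  let fDigit : Int :=
    if 1 ≤ dc then PySem.Int.floordiv n (10 ^ (dc - 1).toNat)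
    else if n = 0 then 0 else -10
  if lDigit ≠ fDigit then false else true

def sandwichLoop (digit n : Int) : Bool :=
  if n > 9 then
    if PySem.Int.mod n 10 = digit then false
    else sandwichLoop digit (PySem.Int.floordiv n 10)
  else true
termination_by n.toNat
decreasing_by
  rw [PySem.Int.floordiv_eq_ediv_of_pos (by omega : (0:Int) < 10)]
  omega

def sandwich (n : Int) : Bool :=
  if digitChecker n = false then false
  else
    let digit := PySem.Int.mod n 10
    sandwichLoop digit (PySem.Int.floordiv n 10)

-- ===== PORT B =====
-- s[0] and s[-1] never raise (str(n) is nonempty); s[1:-1] = drop first and last char.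
def sandwich_alt (n : Int) : Bool :=
  let s := (PySem.Int.toStr n).toList
  (s.headD ' ' == s.getLastD ' ') && !((s.drop 1).dropLast.contains (s.getLastD ' '))

-- ===== PRECONDITION & SPEC =====
def Spec_sandwich (n : Int) (out : Bool) : Prop := out = sandwich_alt n
instance (n : Int) (out : Bool) : Decidable (Spec_sandwich n out) := by unfold Spec_sandwich; infer_instance

-- ===== CLAIM (what is proved, stated in full; the proofs are below) =====
def Claim_equal_sandwich : Prop := ∀ (n : Int), Dom_sandwich n → Spec_sandwich n (sandwich n)

-- ===== LEMMAS AND PROOFS =====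

-- core's Nat.toDigitsCore, base 10, enough fuel, is the reversed digitChar image of Nat.digits
lemma toDigitsCore_eq (fuel : Nat) : ∀ m : Nat, 0 < m → m < fuel → ∀ ds : List Char,
    Nat.toDigitsCore 10 fuel m ds = ((Nat.digits 10 m).map Nat.digitChar).reverse ++ ds := by
  induction fuel with
  | zero => intro m _ h; omega
  | succ f ih =>
    intro m hm hf ds
    rw [Nat.toDigitsCore]
    by_cases h10 : m / 10 = 0
    · simp only [h10]
      rw [Nat.digits_def' (by norm_num : 1 < 10) hm, h10]
      simp
    · simp only [h10]
      rw [ih (m / 10) (Nat.pos_of_ne_zero h10)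
        (by have := Nat.div_lt_self hm (by norm_num : 1 < 10); omega)]
      rw [Nat.digits_def' (by norm_num : 1 < 10) hm]
      simp

lemma toDigits_eq (m : Nat) (hm : 0 < m) :
    Nat.toDigits 10 m = ((Nat.digits 10 m).map Nat.digitChar).reverse := by
  simpa [Nat.toDigits] using toDigitsCore_eq (m + 1) m hm (by omega) []

lemma digitCount_eq (m : Nat) : digitCount (m : Int) = ((Nat.digits 10 m).length : Int) := by
  induction m using Nat.strong_induction_on with
  | _ m ih =>
    rw [digitCount]
    by_cases hm : 0 < m
    · rw [if_pos (by exact_mod_cast hm)]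
      rw [show (10:Int) = ((10:Nat):Int) from rfl, PySem.Int.floordiv_natCast m 10]
      rw [ih (m / 10) (Nat.div_lt_self hm (by norm_num))]
      rw [Nat.digits_def' (by norm_num : 1 < 10) hm]
      simp only [List.length_cons]; push_cast; ring
    · have : m = 0 := by omega
      subst this; simp

-- the leading decimal digit is the last element of Nat.digits
lemma leading_eq (m : Nat) (hm : 0 < m) :
    m / 10 ^ ((Nat.digits 10 m).length - 1) = (Nat.digits 10 m).getLastD 0 := by
  induction m using Nat.strong_induction_on with
  | _ m ih =>
    rw [Nat.digits_def' (by norm_num : 1 < 10) hm]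
    by_cases h10 : m / 10 = 0
    · rw [h10]
      simp [Nat.mod_eq_of_lt (by omega : m < 10)]
    · have hpos := Nat.pos_of_ne_zero h10
      have hds : Nat.digits 10 (m / 10) ≠ [] := Nat.digits_ne_nil_iff_ne_zero.mpr h10
      rw [List.getLastD_cons]
      have e1 : ((m % 10 :: Nat.digits 10 (m / 10)).length - 1) = (Nat.digits 10 (m / 10)).length := by simp
      rw [e1]
      have e2 : 10 ^ (Nat.digits 10 (m / 10)).length
          = 10 * 10 ^ ((Nat.digits 10 (m / 10)).length - 1) := by
        rw [← pow_succ']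
        congr 1
        cases h : Nat.digits 10 (m / 10) with
        | nil => exact absurd h hds
        | cons a l => simp
      rw [e2, ← Nat.div_div_eq_div_mul]
      rw [ih (m / 10) (Nat.div_lt_self hm (by norm_num)) hpos]
      cases h : Nat.digits 10 (m / 10) with
      | nil => exact absurd h hds
      | cons a l =>
        cases hgl : (a :: l).getLast? with
        | none => simp at hgl
        | some x => simp [List.getLastD]

-- A's while-loop over n // 10, // 10, … checks exactly the non-leading digits
lemma sandwichLoop_eq (digit : Int) (m : Nat) :
    sandwichLoop digit (m : Int)
      = !decide (digit ∈ (Nat.digits 10 m).dropLast.map (fun d => (d : Int))) := by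
  induction m using Nat.strong_induction_on with
  | _ m ih =>
    rw [sandwichLoop]
    by_cases hm : 10 ≤ m
    · rw [if_pos (by exact_mod_cast (by omega : (9:Int) < (m:Int)))]
      have hpos : 0 < m / 10 := by
        have := Nat.div_le_div_right (c := 10) hm; omega
      have hds : Nat.digits 10 (m / 10) ≠ [] :=
        Nat.digits_ne_nil_iff_ne_zero.mpr (by omega)
      rw [Nat.digits_def' (by norm_num : 1 < 10) (by omega : 0 < m)]
      rw [List.dropLast_cons_of_ne_nil hds]
      rw [show (10:Int) = ((10:Nat):Int) from rfl, PySem.Int.mod_natCast m 10,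
          PySem.Int.floordiv_natCast m 10]
      by_cases heq : ((m % 10 : Nat) : Int) = digit
      · rw [if_pos heq]
        simp [← heq]
      · rw [if_neg heq, ih (m / 10) (Nat.div_lt_self (by omega) (by norm_num))]
        simp only [Bool.not_inj_iff, decide_eq_decide, List.mem_map]
        constructor
        · rintro ⟨x, hx, hxd⟩; exact ⟨x, List.mem_cons_of_mem _ hx, hxd⟩
        · rintro ⟨x, hx, hxd⟩
          rcases List.mem_cons.mp hx with rfl | hx'
          · exact absurd hxd heq
          · exact ⟨x, hx', hxd⟩
    · rw [if_neg (by exact_mod_cast (by omega : ¬ (9:Int) < (m:Int)))]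
      have hnil : (Nat.digits 10 m).dropLast = [] := by
        rcases Nat.eq_zero_or_pos m with h0 | h0
        · simp [h0]
        · rw [Nat.digits_def' (by norm_num : 1 < 10) h0,
            Nat.div_eq_of_lt (by omega), Nat.digits_zero]
          simp
      simp [hnil]

lemma digitChar_inj : ∀ d1 < 10, ∀ d2 < 10, Nat.digitChar d1 = Nat.digitChar d2 → d1 = d2 := by
  decide

lemma digitChar_ne_dash : ∀ d < 10, Nat.digitChar d ≠ '-' := by decide

lemma getLastD_map_of_ne_nil {α β : Type} (f : α → β) : ∀ (l : List α), l ≠ [] → ∀ (d : β) (d' : α),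
    (l.map f).getLastD d = f (l.getLastD d') := by
  intro l
  induction l with
  | nil => intro h; exact absurd rfl h
  | cons a t ih =>
    intro _ d d'
    cases t with
    | nil => simp
    | cons b t' =>
      rw [List.map_cons, List.getLastD_cons, List.getLastD_cons,
        ih (by simp) (f a) a]

lemma getLastD_mem_of_ne_nil {α : Type} : ∀ (l : List α), l ≠ [] → ∀ (d : α), l.getLastD d ∈ l := by
  intro l
  induction l with
  | nil => intro h; exact absurd rfl h
  | cons a t ih =>
    intro _ d
    cases t with
    | nil => simp
    | cons b t' =>
      rw [List.getLastD_cons]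
      exact List.mem_cons_of_mem _ (ih (by simp) a)

lemma mem_map_natCast (x : Nat) (l : List Nat) :
    ((x : Int) ∈ l.map (fun d => (d : Int))) ↔ x ∈ l := by
  simp

-- ===== VERDICT (by name: the statement is the Claim_ definition above) =====
theorem sandwich_spec : Claim_equal_sandwich := by
  intro n _
  show sandwich n = sandwich_alt n
  rcases lt_trichotomy n 0 with hneg | rfl | hpos
  · -- n < 0: A's digitChecker fails (lDigit ∈ [0,9] vs a negative float), B's s[0] = '-'
    have hchk : digitChecker n = false := by
      unfold digitChecker
      dsimp only
      rw [digitCount, if_neg (by omega : ¬ n > 0)]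
      rw [if_neg (by norm_num : ¬ (1:Int) ≤ 0), if_neg (by omega : ¬ n = 0)]
      rw [if_pos (show PySem.Int.mod n 10 ≠ -10 by
        intro hc
        have h0 := PySem.Int.mod_nonneg (a := n) (b := 10) (by norm_num)
        rw [hc] at h0
        omega)]
    have hA : sandwich n = false := by
      unfold sandwich
      rw [hchk]
      simp
    rw [hA]
    -- B side
    have habs : 0 < n.natAbs := by omega
    have hds : Nat.digits 10 n.natAbs ≠ [] := Nat.digits_ne_nil_iff_ne_zero.mpr (by omega)
    unfold sandwich_alt
    dsimp only
    rw [PySem.Int.toList_toStr]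
    unfold PySem.Int.toChars
    rw [if_pos hneg, toDigits_eq n.natAbs habs]
    cases h : Nat.digits 10 n.natAbs with
    | nil => exact absurd h hds
    | cons d0 dt =>
      have hd0 : d0 < 10 := Nat.digits_lt_base (by norm_num) (h ▸ List.mem_cons_self)
      rw [List.map_cons, List.reverse_cons]
      rw [show ('-' :: ((dt.map Nat.digitChar).reverse ++ [Nat.digitChar d0])).getLastD ' '
          = Nat.digitChar d0 by rw [List.getLastD_cons, List.getLastD_concat]]
      rw [show ('-' :: ((dt.map Nat.digitChar).reverse ++ [Nat.digitChar d0])).headD ' '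
          = '-' from rfl]
      rw [show ('-' == Nat.digitChar d0) = false by
        rw [beq_eq_false_iff_ne]
        exact fun hc => digitChar_ne_dash d0 hd0 hc.symm]
      rw [Bool.false_and]
  · -- n = 0: both return true
    have hA : sandwich 0 = true := by
      unfold sandwich digitChecker
      dsimp only
      rw [digitCount, sandwichLoop]
      simp
    have hB : sandwich_alt 0 = true := by decide
    rw [hA, hB]
  · -- n > 0
    obtain ⟨m, rfl⟩ : ∃ m : Nat, n = (m : Int) := ⟨n.toNat, by omega⟩
    have hm : 0 < m := by exact_mod_cast hpos
    have hds : Nat.digits 10 m ≠ [] := Nat.digits_ne_nil_iff_ne_zero.mpr (by omega)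
    set dt := Nat.digits 10 (m / 10) with hdt
    have hsplit : Nat.digits 10 m = m % 10 :: dt :=
      Nat.digits_def' (by norm_num : 1 < 10) hm
    set g := (Nat.digits 10 m).getLastD 0 with hg
    have hg10 : g < 10 :=
      Nat.digits_lt_base (by norm_num) (getLastD_mem_of_ne_nil _ hds 0)
    have hm10 : m % 10 < 10 := Nat.mod_lt _ (by norm_num)
    have hmod : PySem.Int.mod (m:Int) 10 = ((m % 10 : Nat) : Int) := by
      exact_mod_cast PySem.Int.mod_natCast m 10
    have hdiv : PySem.Int.floordiv (m:Int) 10 = ((m / 10 : Nat) : Int) := by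
      exact_mod_cast PySem.Int.floordiv_natCast m 10
    have hdivp : PySem.Int.floordiv (m:Int) ((10:Int) ^ ((Nat.digits 10 m).length - 1))
        = ((m / 10 ^ ((Nat.digits 10 m).length - 1) : Nat) : Int) := by
      exact_mod_cast PySem.Int.floordiv_natCast m (10 ^ ((Nat.digits 10 m).length - 1))
    have hlen : 1 ≤ ((Nat.digits 10 m).length : Int) := by
      rw [hsplit]; simp
    have hexp : ((((Nat.digits 10 m).length : Int) - 1).toNat) = (Nat.digits 10 m).length - 1 := by
      omega
    -- A's first/last-digit check, through leading_eq
    have hchk : digitChecker (m:Int) = decide (m % 10 = g) := by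
      unfold digitChecker
      dsimp only
      rw [digitCount_eq m, hmod, if_pos hlen, hexp, hdivp, leading_eq m hm, ← hg]
      by_cases hfl : m % 10 = g
      · rw [if_neg (show ¬ ((m % 10 : Nat) : Int) ≠ ((g : Nat) : Int) by simp [hfl])]
        simp [hfl]
      · rw [if_pos (show ((m % 10 : Nat) : Int) ≠ ((g : Nat) : Int) by exact_mod_cast hfl)]
        simp [hfl]
    -- A's value
    have hA : sandwich (m : Int)
        = (decide (m % 10 = g) && !decide (m % 10 ∈ dt.dropLast)) := by
      unfold sandwich
      dsimp only
      rw [hchk, hmod, hdiv, sandwichLoop_eq, ← hdt]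
      by_cases hfl : m % 10 = g
      · rw [if_neg (show ¬ (decide (m % 10 = g) = false) by simp [hfl])]
        rw [decide_eq_true hfl, Bool.true_and]
        congr 1
        rw [decide_eq_decide]
        exact mem_map_natCast (m % 10) dt.dropLast
      · rw [if_pos (show decide (m % 10 = g) = false by simp [hfl])]
        simp [hfl]
    -- B's value
    have hB : sandwich_alt (m : Int)
        = (decide (g = m % 10) && !decide (m % 10 ∈ dt.dropLast)) := by
      unfold sandwich_alt
      dsimp only
      rw [PySem.Int.toList_toStr]
      unfold PySem.Int.toChars
      rw [if_neg (by omega : ¬ (m:Int) < 0), show ((m:Int)).toNat = m by omega,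
        toDigits_eq m hm]
      rw [show ((Nat.digits 10 m).map Nat.digitChar).reverse.getLastD ' '
          = Nat.digitChar (m % 10) by
        rw [hsplit, List.map_cons, List.reverse_cons, List.getLastD_concat]]
      rw [show ((Nat.digits 10 m).map Nat.digitChar).reverse.headD ' '
          = Nat.digitChar g by
        rw [List.headD_eq_head?_getD, List.head?_reverse, ← List.getLastD_eq_getLast?]
        exact getLastD_map_of_ne_nil _ _ hds ' ' 0]
      rw [show (((Nat.digits 10 m).map Nat.digitChar).reverse.drop 1).dropLast
          = (dt.dropLast.map Nat.digitChar).reverse by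
        rw [List.drop_one, List.tail_reverse, List.dropLast_reverse]
        congr 1
        rw [hsplit, List.map_cons]
        cases hdt2 : dt with
        | nil => simp
        | cons b t2 =>
          rw [List.dropLast_cons_of_ne_nil (by simp), List.tail_cons, ← List.map_dropLast]]
      congr 1
      · rw [Bool.beq_eq_decide_eq, decide_eq_decide]
        constructor
        · exact fun hc => digitChar_inj g hg10 (m % 10) hm10 hc
        · intro h; rw [h]
      · rw [List.contains_eq_mem, Bool.not_inj_iff, decide_eq_decide, List.mem_reverse,
          List.mem_map]
        constructor
        · rintro ⟨x, hx, hxe⟩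
          have hx10 : x < 10 :=
            Nat.digits_lt_base (by norm_num) (List.dropLast_subset _ hx)
          exact (digitChar_inj x hx10 (m % 10) hm10 hxe) ▸ hx
        · intro hx; exact ⟨m % 10, hx, rfl⟩
    rw [hA, hB]
    congr 1
    rw [decide_eq_decide]
    exact eq_comm
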